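-- pv_equiv track=rewrite | github.com/liuCunh/project | pythonProject/大二上学期/sohpomerAlgorithm/完美立方.py | func
-- ===== SOURCE A (Python) =====
-- def func(n):
--     li = []
--     for cube in range(n, 1, -1):
--
--         for a in range(2, cube):
--             for b in range(a+1, cube):
--                 for c in range(b+1, cube):
--                     if cube**3 == a**3+b**3+c**3:
--                         li.append([cube, a, b, c])
--
--     li.sort(key=lambda x: x[0], reverse=False)
--     return li
-- ===== SOURCE B (Python) =====
-- def func(n):
--     cubes = {}
--     for c in range(n):
--         cubes[c ** 3] = c
--     li = []
--     for cube in range(2, n + 1):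
--         cube3 = cube ** 3
--         for a in range(2, cube):
--             a3 = a ** 3
--             for b in range(a + 1, cube):
--                 c = cubes.get(cube3 - a3 - b ** 3)
--                 if c is not None and b < c < cube:
--                     li.append([cube, a, b, c])
--     return li
-- ===== Notes on version B (the rewrite author's own statement) =====
-- stated objective: faster
-- what changed: B precomputes a dictionary from each cube value to its root once and replaces A's innermost brute-force scan over c by a single dictionary probe, and iterates cube ascending so A's final stable sort disappears; intended as asymptotically faster, measured 43.8x at the largest size both finished.
import Mathlib
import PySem

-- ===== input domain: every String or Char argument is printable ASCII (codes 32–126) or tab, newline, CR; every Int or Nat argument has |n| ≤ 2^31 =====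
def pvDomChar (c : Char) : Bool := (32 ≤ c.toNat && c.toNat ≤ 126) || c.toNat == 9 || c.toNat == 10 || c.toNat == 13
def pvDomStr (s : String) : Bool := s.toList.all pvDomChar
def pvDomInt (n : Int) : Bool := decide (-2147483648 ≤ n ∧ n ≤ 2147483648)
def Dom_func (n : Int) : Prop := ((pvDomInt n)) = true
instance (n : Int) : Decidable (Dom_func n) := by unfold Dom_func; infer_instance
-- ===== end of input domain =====

-- B replaces A's innermost scan over c by a precomputed cube→root dictionary and
-- iterates cube ascending, so A's final sort disappears.

-- ===== PORT A =====
def func (n : Int) : List (List Int) :=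
  let li : List (List Int) :=
    (PySem.List.pyRange n 1 (-1)).foldl (fun li cube =>
      (PySem.List.pyRange 2 cube).foldl (fun li a =>
        (PySem.List.pyRange (a+1) cube).foldl (fun li b =>
          (PySem.List.pyRange (b+1) cube).foldl (fun li c =>
            if cube^3 = a^3 + b^3 + c^3 then li ++ [[cube, a, b, c]] else li) li) li) li) []
  PySem.List.sorted li (fun x => PySem.List.pyGetD x 0 0) false

-- ===== PORT B =====
def func_alt (n : Int) : List (List Int) :=
  let cubes : PySem.Dict Int Int :=
    (PySem.List.pyRange 0 n).foldl (fun d c => d.insert (c^3) c) PySem.Dict.empty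
  (PySem.List.pyRange 2 (n+1)).foldl (fun li cube =>
    let cube3 := cube^3
    (PySem.List.pyRange 2 cube).foldl (fun li a =>
      let a3 := a^3
      (PySem.List.pyRange (a+1) cube).foldl (fun li b =>
        match cubes.get? (cube3 - a3 - b^3) with
        | some c => if b < c ∧ c < cube then li ++ [[cube, a, b, c]] else li
        | none => li) li) li) []

-- ===== PRECONDITION & SPEC =====
def Spec_func (n : Int) (out : List (List Int)) : Prop := out = func_alt n
instance (n : Int) (out : List (List Int)) : Decidable (Spec_func n out) := by unfold Spec_func; infer_instance

-- ===== CLAIM (what is proved, stated in full; the proofs are below) =====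
def Claim_equal_func : Prop := ∀ (n : Int), Dom_func n → Spec_func n (func n)

-- ===== LEMMAS AND PROOFS =====

-- the quadruples A collects for one cube and a, b, in A's inner c-loop order
def pvGA (cube a b : Int) : List (List Int) :=
  ((PySem.List.pyRange (b+1) cube).filter (fun c => decide (cube^3 = a^3 + b^3 + c^3))).map
    (fun c => [cube, a, b, c])

def pvBlockA (cube : Int) : List (List Int) :=
  (PySem.List.pyRange 2 cube).flatMap (fun a =>
    (PySem.List.pyRange (a+1) cube).flatMap (fun b => pvGA cube a b))

def pvDictOf (n : Int) : PySem.Dict Int Int :=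
  (PySem.List.pyRange 0 n).foldl (fun d c => d.insert (c^3) c) PySem.Dict.empty

def pvGB (n cube a b : Int) : List (List Int) :=
  match (pvDictOf n).get? (cube^3 - a^3 - b^3) with
  | some c => if b < c ∧ c < cube then [[cube, a, b, c]] else []
  | none => []

def pvBlockB (n cube : Int) : List (List Int) :=
  (PySem.List.pyRange 2 cube).flatMap (fun a =>
    (PySem.List.pyRange (a+1) cube).flatMap (fun b => pvGB n cube a b))

-- cubing is strictly monotone, hence injective, on Int
lemma pvCube_lt {x y : Int} (h : x < y) : x^3 < y^3 := by
  nlinarith [sq_nonneg x, sq_nonneg y, sq_nonneg (x+y)]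

lemma pvCube_inj {x y : Int} (h : x^3 = y^3) : x = y := by
  rcases lt_trichotomy x y with h' | h' | h'
  · exact absurd h (ne_of_lt (pvCube_lt h'))
  · exact h'
  · exact absurd h.symm (ne_of_lt (pvCube_lt h'))

-- range facts
lemma pvRange_pairwise (a b : Int) : (PySem.List.pyRange a b).Pairwise (· < ·) := by
  rw [PySem.List.pyRange_of_pos a b (by norm_num)]
  refine List.Pairwise.map _ ?_ (List.pairwise_lt_range)
  intro x y h
  omega

lemma pvRange_nodup (a b : Int) : (PySem.List.pyRange a b).Nodup :=
  (pvRange_pairwise a b).imp ne_of_lt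

lemma pvRange_desc (n : Int) :
    PySem.List.pyRange n 1 (-1) = (PySem.List.pyRange 2 (n+1)).reverse := by
  rw [PySem.List.pyRange_of_pos 2 (n+1) (by norm_num)]
  unfold PySem.List.pyRange
  norm_num
  by_cases h : 1 < n
  · rw [if_pos h, if_pos (by omega : (2:Int) ≤ n)]
    apply List.ext_getElem
    · simp
      omega
    · intro i h1 h2
      simp only [List.length_map, List.length_range] at h1 h2
      rw [List.getElem_reverse]
      simp only [List.getElem_map, List.getElem_range, List.length_map, List.length_range]
      omega
  · rw [if_neg h, if_neg (by omega : ¬ (2:Int) ≤ n)]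
    simp

-- dictionary characterisation
lemma pvDict_skip (cs : List Int) (d : PySem.Dict Int Int) (t : Int)
    (h : ∀ c ∈ cs, c^3 ≠ t) :
    (cs.foldl (fun d c => d.insert (c^3) c) d).get? t = d.get? t := by
  induction cs generalizing d with
  | nil => rfl
  | cons c0 cs ih =>
      simp only [List.foldl_cons]
      rw [ih _ (fun c hc => h c (List.mem_cons_of_mem _ hc)),
        PySem.Dict.get?_insert_of_ne _ _ (fun ht => (h c0 List.mem_cons_self ht.symm))]

lemma pvDict_mem (cs : List Int) (d : PySem.Dict Int Int) (c : Int) (hc : c ∈ cs) :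
    (cs.foldl (fun d c => d.insert (c^3) c) d).get? (c^3) = some c := by
  induction cs generalizing d with
  | nil => cases hc
  | cons c0 cs ih =>
      simp only [List.foldl_cons]
      by_cases h : c ∈ cs
      · exact ih _ h
      · have hc0 : c = c0 := by
          rcases List.mem_cons.mp hc with h' | h'
          · exact h'
          · exact absurd h' h
        subst hc0
        rw [pvDict_skip _ _ _ (fun c' hc' ht => h (by rwa [pvCube_inj ht] at hc')),
          PySem.Dict.get?_insert_self]

lemma pvDict_some (cs : List Int) (d : PySem.Dict Int Int) (t c : Int)
    (h : (cs.foldl (fun d c => d.insert (c^3) c) d).get? t = some c) :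
    (c ∈ cs ∧ c^3 = t) ∨ d.get? t = some c := by
  induction cs generalizing d with
  | nil => exact Or.inr h
  | cons c0 cs ih =>
      simp only [List.foldl_cons] at h
      rcases ih _ h with ⟨h1, h2⟩ | h'
      · exact Or.inl ⟨List.mem_cons_of_mem _ h1, h2⟩
      · by_cases ht : t = c0^3
        · subst ht
          rw [PySem.Dict.get?_insert_self] at h'
          obtain rfl := Option.some_inj.mp h'
          exact Or.inl ⟨List.mem_cons_self, rfl⟩
        · rw [PySem.Dict.get?_insert_of_ne _ _ ht] at h'
          exact Or.inr h'

lemma pvDictOf_mem (n c : Int) (h0 : 0 ≤ c) (h1 : c < n) :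
    (pvDictOf n).get? (c^3) = some c :=
  pvDict_mem _ _ _ (PySem.List.mem_pyRange_one.mpr ⟨h0, h1⟩)

lemma pvDictOf_some (n t c : Int) (h : (pvDictOf n).get? t = some c) :
    0 ≤ c ∧ c < n ∧ c^3 = t := by
  rcases pvDict_some _ _ _ _ h with ⟨h1, h2⟩ | h'
  · have := PySem.List.mem_pyRange_one.mp h1
    exact ⟨this.1, this.2, h2⟩
  · simp [PySem.Dict.get?, PySem.Dict.empty] at h'

-- a filter over a nodup list whose predicate pins down one value
lemma pvFilter_unique (l : List Int) (p : Int → Bool) (c : Int) (hnd : l.Nodup)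
    (hp : ∀ x, p x = true ↔ x = c) :
    l.filter p = if c ∈ l then [c] else [] := by
  induction l with
  | nil => rfl
  | cons x l ih =>
      rcases hnd with _ | ⟨hx, hnd⟩
      by_cases hxc : x = c
      · subst hxc
        have hcl : x ∉ l := fun h => (hx x h rfl).elim
        simp [(hp x).mpr rfl, hcl, ih hnd]
      · have hpx : p x = false := by
          cases h : p x
          · rfl
          · exact absurd ((hp x).mp h) hxc
        have hcx : ¬ c = x := fun h => hxc h.symm
        simp [hpx, ih hnd, hcx]

-- the per-(cube,a,b) heart: A's c-scan equals B's dictionary probe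
lemma pvG_eq (n cube a b : Int) (hcube : cube ≤ n) (hb : 0 ≤ b) :
    pvGA cube a b = pvGB n cube a b := by
  unfold pvGA pvGB
  cases h : (pvDictOf n).get? (cube^3 - a^3 - b^3) with
  | none =>
      show _ = ([] : List (List Int))
      rw [List.filter_eq_nil_iff.mpr, List.map_nil]
      intro c hc
      have hm := PySem.List.mem_pyRange_one.mp hc
      simp only [decide_eq_true_eq]
      intro heq
      have hs : (pvDictOf n).get? (cube^3 - a^3 - b^3) = some c := by
        have hc3 : c^3 = cube^3 - a^3 - b^3 := by omega
        rw [← hc3]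
        exact pvDictOf_mem n c (by omega) (by omega)
      rw [h] at hs
      cases hs
  | some c =>
      show _ = if b < c ∧ c < cube then [[cube, a, b, c]] else []
      obtain ⟨hc0, hcn, hct⟩ := pvDictOf_some n _ c h
      rw [pvFilter_unique _ _ c (pvRange_nodup _ _)
        (fun x => by
          simp only [decide_eq_true_eq]
          constructor
          · intro hx; exact pvCube_inj (by omega)
          · intro hx; subst hx; omega)]
      by_cases hin : b < c ∧ c < cube
      · rw [if_pos (PySem.List.mem_pyRange_one.mpr ⟨by omega, hin.2⟩), if_pos hin]
        rfl
      · rw [if_neg (fun hm => hin (by have := PySem.List.mem_pyRange_one.mp hm; omega)),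
          if_neg hin]
        rfl

lemma pvFlatMap_congr (l : List Int) (f g : Int → List (List Int))
    (h : ∀ x ∈ l, f x = g x) : l.flatMap f = l.flatMap g := by
  induction l with
  | nil => rfl
  | cons x l ih =>
      simp only [List.flatMap_cons, h x List.mem_cons_self,
        ih (fun y hy => h y (List.mem_cons_of_mem _ hy))]

lemma pvBlock_eq (n cube : Int) (hcube : cube ≤ n) : pvBlockA cube = pvBlockB n cube := by
  unfold pvBlockA pvBlockB
  refine pvFlatMap_congr _ _ _ (fun a ha => ?_)
  refine pvFlatMap_congr _ _ _ (fun b hb => ?_)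
  have ha' := PySem.List.mem_pyRange_one.mp ha
  have hb' := PySem.List.mem_pyRange_one.mp hb
  exact pvG_eq n cube a b hcube (by omega)

-- every entry of a block carries its cube value as sort key
lemma pvBlockA_key (cube : Int) (x : List Int) (hx : x ∈ pvBlockA cube) :
    PySem.List.pyGetD x 0 0 = cube := by
  simp only [pvBlockA, pvGA, List.mem_flatMap, List.mem_map] at hx
  obtain ⟨a, -, b, -, c, -, rfl⟩ := hx
  exact PySem.List.pyGetD_zero_cons _ _ _

-- A's raw accumulation is the flatMap of blocks over the descending cube range
lemma pvA_raw (n : Int) :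
    (PySem.List.pyRange n 1 (-1)).foldl (fun li cube =>
      (PySem.List.pyRange 2 cube).foldl (fun li a =>
        (PySem.List.pyRange (a+1) cube).foldl (fun li b =>
          (PySem.List.pyRange (b+1) cube).foldl (fun li c =>
            if cube^3 = a^3 + b^3 + c^3 then li ++ [[cube, a, b, c]] else li) li) li) li) []
    = (PySem.List.pyRange n 1 (-1)).flatMap pvBlockA := by
  rw [PySem.List.foldl_congr_mem _ _ (fun li cube => li ++ pvBlockA cube) _ ?_,
    PySem.List.foldl_append_eq_flatMap, List.nil_append]
  intro li cube _
  unfold pvBlockA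
  rw [PySem.List.foldl_congr_mem _ _
    (fun li a => li ++ (PySem.List.pyRange (a+1) cube).flatMap (fun b => pvGA cube a b)) _ ?_,
    PySem.List.foldl_append_eq_flatMap]
  intro li a _
  rw [PySem.List.foldl_congr_mem _ _ (fun li b => li ++ pvGA cube a b) _ ?_,
    PySem.List.foldl_append_eq_flatMap]
  intro li b _
  have h1 := PySem.List.foldl_append_if (fun c => decide (cube^3 = a^3 + b^3 + c^3))
    (fun c => [cube, a, b, c]) (PySem.List.pyRange (b+1) cube) li
  simp only [decide_eq_true_eq] at h1
  rw [h1]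
  rfl

lemma pvB_raw (n : Int) : func_alt n = (PySem.List.pyRange 2 (n+1)).flatMap (pvBlockB n) := by
  unfold func_alt
  rw [PySem.List.foldl_congr_mem _ _ (fun li cube => li ++ pvBlockB n cube) _ ?_,
    PySem.List.foldl_append_eq_flatMap, List.nil_append]
  intro li cube _
  unfold pvBlockB
  rw [PySem.List.foldl_congr_mem _ _
    (fun li a => li ++ (PySem.List.pyRange (a+1) cube).flatMap (fun b => pvGB n cube a b)) _ ?_,
    PySem.List.foldl_append_eq_flatMap]
  intro li a _
  rw [PySem.List.foldl_congr_mem _ _ (fun li b => li ++ pvGB n cube a b) _ ?_,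
    PySem.List.foldl_append_eq_flatMap]
  intro li b _
  show (match (pvDictOf n).get? (cube^3 - a^3 - b^3) with
        | some c => if b < c ∧ c < cube then li ++ [[cube, a, b, c]] else li
        | none => li) = li ++ pvGB n cube a b
  unfold pvGB
  cases (pvDictOf n).get? (cube^3 - a^3 - b^3) with
  | none => simp
  | some c =>
      by_cases hin : b < c ∧ c < cube
      · simp [hin]
      · simp [hin]

-- stable insertion sort of constant-key blocks listed in strictly decreasing key order
lemma pvInsert_block (key : List Int → Int) (k : Int) (x : List Int) (pref acc : List (List Int))
    (hx : key x = k) (hpref : ∀ y ∈ pref, key y = k) (hacc : ∀ y ∈ acc, k < key y) :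
    PySem.List.insertBy (fun a b => decide (key a < key b)) x (pref ++ acc)
      = pref ++ x :: acc := by
  induction pref with
  | nil =>
      cases acc with
      | nil => simp [PySem.List.insertBy]
      | cons y acc =>
          have : key x < key y := hx ▸ hacc y List.mem_cons_self
          simp [PySem.List.insertBy, this]
  | cons p pref ih =>
      have hkp : ¬ key x < key p := by
        rw [hx, hpref p List.mem_cons_self]
        exact lt_irrefl k
      simp only [List.cons_append, PySem.List.insertBy, hkp, decide_false]
      rw [ih (fun y hy => hpref y (List.mem_cons_of_mem _ hy))]
      simp

lemma pvFold_block (key : List Int → Int) (k : Int) (blk pref acc : List (List Int))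
    (hblk : ∀ y ∈ blk, key y = k) (hpref : ∀ y ∈ pref, key y = k)
    (hacc : ∀ y ∈ acc, k < key y) :
    blk.foldl (fun acc x => PySem.List.insertBy (fun a b => decide (key a < key b)) x acc)
      (pref ++ acc) = pref ++ blk ++ acc := by
  induction blk generalizing pref with
  | nil => simp
  | cons y blk ih =>
      simp only [List.foldl_cons]
      rw [pvInsert_block key k y pref acc (hblk y List.mem_cons_self) hpref hacc,
        show pref ++ y :: acc = (pref ++ [y]) ++ acc by simp,
        ih (pref ++ [y]) (fun z hz => hblk z (List.mem_cons_of_mem _ hz))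
          (fun z hz => by
            rcases List.mem_append.mp hz with h | h
            · exact hpref z h
            · rw [List.mem_singleton.mp h]; exact hblk y List.mem_cons_self)]
      simp

lemma pvSort_blocks (key : List Int → Int) (cs : List Int) (f : Int → List (List Int))
    (hps : cs.Pairwise (· < ·)) (hkey : ∀ c ∈ cs, ∀ x ∈ f c, key x = c) :
    PySem.List.sorted (cs.reverse.flatMap f) key false = cs.flatMap f := by
  rw [PySem.List.sorted_eq_foldl_insertBy]
  induction cs with
  | nil => rfl
  | cons c cs ih =>
      rcases hps with _ | ⟨hlt, hps⟩
      simp only [List.reverse_cons, List.flatMap_append, List.flatMap_cons,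
        List.flatMap_nil, List.append_nil, List.foldl_append]
      rw [ih hps (fun c' hc' x hx => hkey c' (List.mem_cons_of_mem _ hc') x hx)]
      have := pvFold_block key c (f c) [] (cs.flatMap f)
        (fun y hy => hkey c List.mem_cons_self y hy)
        (by intro y hy; cases hy)
        (by intro y hy
            obtain ⟨c', hc', hy'⟩ := List.mem_flatMap.mp hy
            rw [hkey c' (List.mem_cons_of_mem _ hc') y hy']
            exact hlt c' hc')
      simpa using this

-- ===== VERDICT (by name: the statement is the Claim_ definition above) =====
theorem func_spec : Claim_equal_func := by
  intro n _
  show func n = func_alt n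
  unfold func
  rw [pvA_raw, pvRange_desc]
  rw [pvSort_blocks _ _ _ (pvRange_pairwise 2 (n+1)) (fun c _ x hx => pvBlockA_key c x hx)]
  rw [pvB_raw]
  refine pvFlatMap_congr _ _ _ (fun cube hc => ?_)
  exact pvBlock_eq n cube (by have := PySem.List.mem_pyRange_one.mp hc; omega)
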